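-- pv_equiv track=rewrite | github.com/Junroot/Algorithm | programmers/64064-1.py | count_combination
-- ===== SOURCE A (Python) =====
-- def count_combination(matched_ids, used_ids, current_index):
--     result = set()
--     if current_index == len(matched_ids):
--         used_bit = 0
--         for used_id in used_ids:
--             used_bit = used_bit | 1 << used_id
--         return {used_bit}
--     for matched_id in matched_ids[current_index]:
--         if matched_id in used_ids:
--             continue
--         used_ids.add(matched_id)
--         result = result.union(count_combination(matched_ids, used_ids, current_index + 1))
--         used_ids.remove(matched_id)
--     return result
-- ===== SOURCE B (Python) =====
-- def count_combination(matched_ids, used_ids, current_index):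
--     frontier = [set(used_ids)]
--     for index in range(current_index, len(matched_ids)):
--         row = matched_ids[index]
--         frontier = [s | {matched_id}
--                     for s in frontier
--                     for matched_id in row
--                     if matched_id not in s]
--     result = set()
--     for s in frontier:
--         used_bit = 0
--         for used_id in s:
--             used_bit |= 1 << used_id
--         result.add(used_bit)
--     return result
-- ===== Notes on version B (the rewrite author's own statement) =====
-- stated objective: alternative
-- what changed: Replaces A's depth-first recursion over a shared mutable id-set (per-branch set unions, add/remove backtracking) by an iterative breadth-first frontier of partial id-sets folded forward over the rows, converting to bitmasks once at the end.
import Mathlib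
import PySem

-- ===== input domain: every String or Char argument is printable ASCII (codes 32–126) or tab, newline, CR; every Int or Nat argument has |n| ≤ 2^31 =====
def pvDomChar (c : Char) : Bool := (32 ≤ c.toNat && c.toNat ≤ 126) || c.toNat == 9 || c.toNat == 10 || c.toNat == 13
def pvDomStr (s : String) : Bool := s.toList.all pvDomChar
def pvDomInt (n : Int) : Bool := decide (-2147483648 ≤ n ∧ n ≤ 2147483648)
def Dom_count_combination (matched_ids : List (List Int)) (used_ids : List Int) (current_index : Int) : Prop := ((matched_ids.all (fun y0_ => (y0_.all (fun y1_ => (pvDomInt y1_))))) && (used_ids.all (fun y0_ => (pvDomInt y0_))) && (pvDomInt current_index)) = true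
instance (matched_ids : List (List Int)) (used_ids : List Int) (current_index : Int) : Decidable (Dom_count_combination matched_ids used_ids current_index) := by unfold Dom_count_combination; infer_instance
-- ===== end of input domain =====

-- ===== PORT A =====
-- B replaces A's recursion (DFS with per-branch set unions and backtracking on
-- a shared mutable set) by an iterative breadth-first frontier of partial sets,
-- folded forward over the rows, with the bitmask conversion done once at the
-- end. A temporarily mutates used_ids (restored before a normal return, but a
-- partial mutation persists when A raises); the equivalence proved here is
-- about the RETURN value only.
mutual
-- inner `for matched_id in matched_ids[current_index]` loop of A; `hi` records
-- that the indexed row exists (pyGet? returned some), used for termination only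
def ccLoop (m : List (List Int)) (used : List Int) (i : Int)
    (hi : i < (m.length : Int)) (row : List Int) (res : List Int) : List Int :=
  match row with
  | [] => res
  | mid :: rest =>
    if mid ∈ used then ccLoop m used i hi rest res
    else ccLoop m used i hi rest
      (PySem.Set.union res (count_combination m (PySem.Set.add used mid) (i + 1)))
termination_by (((m.length : Int) - i).toNat, 0, row.length)
decreasing_by
  · exact Prod.Lex.right _ (Prod.Lex.right _ (by simp))
  · exact Prod.Lex.left _ _ (by omega)
  · exact Prod.Lex.right _ (Prod.Lex.right _ (by simp))

def count_combination (matched_ids : List (List Int)) (used_ids : List Int) (current_index : Int) : List Int :=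
  if current_index = (matched_ids.length : Int) then
    [used_ids.foldl (fun b u => PySem.Int.bor b (1 <<< u.toNat)) 0]
  else
    match h : PySem.List.pyGet? matched_ids current_index with
    | none => []          -- Python raises IndexError here (outside Pre_)
    | some row =>
        ccLoop matched_ids used_ids current_index
          (by
            have hin : PySem.Raise.InRange matched_ids.length current_index := by
              by_contra hc
              rw [← PySem.List.pyGet?_eq_none_iff] at hc
              simp [hc] at h
            exact hin.2)
          row []
termination_by (((matched_ids.length : Int) - current_index).toNat, 1, 0)
decreasing_by
  · exact Prod.Lex.right _ (Prod.Lex.left _ _ (by omega))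
end

-- ===== PORT B =====
-- the inner comprehension `[s | {mid} for mid in row if mid not in s]` for one
-- partial set `s` at row `index` (`matched_ids[index]` is in range on Pre_;
-- Python would raise IndexError on none)
def rowExpand (matched_ids : List (List Int)) (index : Int) (s : PySem.Set Int) : List (PySem.Set Int) :=
  (((PySem.List.pyGet? matched_ids index).getD []).filter
      (fun matched_id => !(PySem.Set.contains s matched_id))).map
    (fun matched_id => PySem.Set.union s [matched_id])

def count_combination_alt (matched_ids : List (List Int)) (used_ids : List Int) (current_index : Int) : List Int :=
  let frontier := (PySem.List.pyRange current_index (matched_ids.length : Int)).foldl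
      (fun frontier index => frontier.flatMap (fun s => rowExpand matched_ids index s))
      [PySem.Set.ofList used_ids]
  frontier.foldl
    (fun result s =>
      PySem.Set.add result (s.foldl (fun b u => PySem.Int.bor b (1 <<< u.toNat)) 0)) []

-- ===== PRECONDITION & SPEC =====
-- the rows A's DFS walks through: matched_ids[current_index:] by Python
-- indexing (a negative current_index wraps, then the whole list follows)
def traversedRows (matched_ids : List (List Int)) (current_index : Int) : List (List Int) :=
  if 0 ≤ current_index then matched_ids.drop current_index.toNat
  else matched_ids.drop (((matched_ids.length : Int) + current_index).toNat) ++ matched_ids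

-- Pre_ excludes (a) current_index outside [-len, len], where A raises
-- IndexError, and (b) inputs on which some completable assignment (one id per
-- traversed row, mutually distinct and outside used_ids) involves a negative
-- id from used_ids or the rows: exactly there A's `1 << id` raises ValueError.
-- used_ids is a Python set, so its Lean list holds distinct elements (Nodup).
def Pre_count_combination (matched_ids : List (List Int)) (used_ids : List Int) (current_index : Int) : Prop :=
  -(matched_ids.length : Int) ≤ current_index ∧ current_index ≤ (matched_ids.length : Int) ∧
  used_ids.Nodup ∧
  ¬ ∃ picks ∈ (traversedRows matched_ids current_index).sections,
      picks.Nodup ∧ (∀ x ∈ picks, x ∉ used_ids) ∧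
      ((∃ x ∈ used_ids, x < 0) ∨ (∃ x ∈ picks, x < 0))

instance (matched_ids : List (List Int)) (used_ids : List Int) (current_index : Int) : Decidable (Pre_count_combination matched_ids used_ids current_index) := by
  unfold Pre_count_combination; infer_instance

def pvWitness_count_combination : List (List Int) × List Int × Int := ([[0, 1], [1, 2]], [5], 0)

def Spec_count_combination (matched_ids : List (List Int)) (used_ids : List Int) (current_index : Int) (out : List Int) : Prop := out = count_combination_alt matched_ids used_ids current_index
instance (matched_ids : List (List Int)) (used_ids : List Int) (current_index : Int) (out : List Int) : Decidable (Spec_count_combination matched_ids used_ids current_index out) := by unfold Spec_count_combination; infer_instance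

-- ===== CLAIM (what is proved, stated in full; the proofs are below) =====
def Claim_equal_count_combination : Prop := ∀ (matched_ids : List (List Int)) (used_ids : List Int) (current_index : Int), Dom_count_combination matched_ids used_ids current_index → Pre_count_combination matched_ids used_ids current_index → Spec_count_combination matched_ids used_ids current_index (count_combination matched_ids used_ids current_index)

-- ===== LEMMAS AND PROOFS =====

-- the bitmask a completed id-set is turned into, as both ports compute it
def bitmaskOf (s : List Int) : Int :=
  s.foldl (fun b u => PySem.Int.bor b (1 <<< u.toNat)) 0

-- the completed id-sets (with multiplicity, in DFS order); fuel-driven proof skeleton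
def leafSets : Nat → List (List Int) → PySem.Set Int → Int → List (PySem.Set Int)
  | 0, m, s, i => if i = (m.length : Int) then [s] else []
  | f + 1, m, s, i =>
      if i = (m.length : Int) then [s]
      else (rowExpand m i s).flatMap (fun s' => leafSets f m s' (i + 1))

theorem foldl_add_absorb {acc xs : List Int} (h : ∀ a ∈ xs, a ∈ acc) :
    List.foldl PySem.Set.add acc xs = acc := by
  induction xs generalizing acc with
  | nil => rfl
  | cons x xs ih =>
      have hx : x ∈ acc := h x List.mem_cons_self
      have : PySem.Set.add acc x = acc := by
        simp [PySem.Set.add, PySem.Set.contains, hx]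
      rw [List.foldl_cons, this]
      exact ih (fun a ha => h a (List.mem_cons_of_mem _ ha))

theorem mem_foldl_add {acc xs : List Int} {y : Int} (h : y ∈ acc ∨ y ∈ xs) :
    y ∈ List.foldl PySem.Set.add acc xs := by
  induction xs generalizing acc with
  | nil => simpa using h.resolve_right (by simp)
  | cons x xs ih =>
      rw [List.foldl_cons]
      rcases h with h | h
      · exact ih (Or.inl ((PySem.Set.mem_add acc x y).mpr (Or.inl h)))
      · rcases List.mem_cons.mp h with rfl | h
        · exact ih (Or.inl ((PySem.Set.mem_add acc y y).mpr (Or.inr rfl)))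
        · exact ih (Or.inr h)

-- folding the adds of an already-deduplicated list adds the same elements
theorem foldl_add_dedup_flatMap (f : Int → List Int) :
    ∀ (p s acc : List Int),
    List.foldl PySem.Set.add acc ((List.foldl PySem.Set.add s p).flatMap f) =
    List.foldl PySem.Set.add acc ((s ++ p).flatMap f) := by
  intro p
  induction p with
  | nil => intro s acc; simp
  | cons x xs ih =>
      intro s acc
      rw [List.foldl_cons]
      by_cases hx : x ∈ s
      · have hadd : PySem.Set.add s x = s := by
          simp [PySem.Set.add, PySem.Set.contains, hx]
        rw [hadd, ih s acc]
        -- (s ++ x :: xs) = (s ++ [x]) ++ xs; the extra f x block is absorbed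
        have : (s ++ x :: xs).flatMap f = (s.flatMap f ++ f x) ++ xs.flatMap f := by
          simp [List.flatMap_append]
        rw [this, List.foldl_append, List.foldl_append]
        have hsplit : (s ++ xs).flatMap f = s.flatMap f ++ xs.flatMap f :=
          List.flatMap_append
        rw [hsplit, List.foldl_append]
        congr 1
        refine (foldl_add_absorb ?_).symm
        intro a ha
        have : a ∈ s.flatMap f := List.mem_flatMap.mpr ⟨x, hx, ha⟩
        exact mem_foldl_add (Or.inr this)
      · have hadd : PySem.Set.add s x = s ++ [x] := by
          simp [PySem.Set.add, PySem.Set.contains, hx]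
        rw [hadd, ih (s ++ [x]) acc]
        simp

theorem update_ofList_absorb (res xs : List Int) :
    List.foldl PySem.Set.add res (PySem.Set.ofList xs) = List.foldl PySem.Set.add res xs := by
  have := foldl_add_dedup_flatMap (fun x => [x]) xs [] res
  simpa [PySem.Set.ofList_eq_foldl] using this

theorem foldl_add_of_disjoint :
    ∀ (xs acc : List Int), (∀ a ∈ xs, a ∉ acc) → xs.Nodup →
    List.foldl PySem.Set.add acc xs = acc ++ xs := by
  intro xs
  induction xs with
  | nil => intro acc _ _; simp
  | cons x xs ih =>
      intro acc hdisj hnd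
      rw [List.foldl_cons]
      have hx : x ∉ acc := hdisj x List.mem_cons_self
      have hadd : PySem.Set.add acc x = acc ++ [x] := by
        simp [PySem.Set.add, PySem.Set.contains, hx]
      rw [hadd, ih (acc ++ [x])
        (by
          intro a ha
          simp only [List.mem_append, List.mem_singleton]
          rintro (h1 | rfl)
          · exact hdisj a (List.mem_cons_of_mem _ ha) h1
          · exact (List.nodup_cons.mp hnd).1 ha)
        (List.nodup_cons.mp hnd).2]
      simp

theorem ofList_of_nodup (xs : List Int) (h : xs.Nodup) : PySem.Set.ofList xs = xs := by
  rw [PySem.Set.ofList_eq_foldl]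
  simpa using foldl_add_of_disjoint xs [] (by simp) h

theorem lemLoop (m : List (List Int)) (i : Int) (hi : i < (m.length : Int)) (fuel : Nat)
    (IH : ∀ used : PySem.Set Int,
      count_combination m used (i + 1)
        = PySem.Set.ofList ((leafSets fuel m used (i + 1)).map bitmaskOf)) :
    ∀ (row : List Int) (used : PySem.Set Int) (res : List Int),
    ccLoop m used i hi row res =
    List.foldl PySem.Set.add res
      ((((row.filter (fun matched_id => !(PySem.Set.contains used matched_id))).map
          (fun matched_id => PySem.Set.union used [matched_id])).flatMap
        (fun s => leafSets fuel m s (i + 1))).map bitmaskOf) := by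
  intro row
  induction row with
  | nil =>
      intro used res
      rw [ccLoop]
      simp
  | cons mid rest ihrow =>
      intro used res
      rw [ccLoop]
      by_cases hmem : mid ∈ used
      · rw [if_pos hmem, ihrow used res]
        simp [hmem]
      · have hc : PySem.Set.contains used mid = false := by
          simp [PySem.Set.contains, hmem]
        rw [if_neg hmem]
        have hunion : PySem.Set.union used [mid] = PySem.Set.add used mid := rfl
        have hcc : count_combination m (PySem.Set.add used mid) (i + 1)
            = PySem.Set.ofList ((leafSets fuel m (PySem.Set.union used [mid]) (i + 1)).map bitmaskOf) := by
          rw [hunion]; exact IH _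
        rw [ihrow used _]
        have hcond : (!(PySem.Set.contains used mid)) = true := by rw [hc]; rfl
        rw [List.filter_cons, if_pos hcond]
        rw [List.map_cons, List.flatMap_cons, List.map_append, List.foldl_append]
        congr 1
        show PySem.Set.union res _ = _
        rw [hcc]
        show List.foldl PySem.Set.add res (PySem.Set.ofList _) = _
        rw [update_ofList_absorb]

theorem lemA (mrows : List (List Int)) :
    ∀ (fuel : Nat) (i : Int) (used : PySem.Set Int),
    (((mrows.length : Int) - i).toNat ≤ fuel) →
    count_combination mrows used i
      = PySem.Set.ofList ((leafSets fuel mrows used i).map bitmaskOf) := by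
  intro fuel
  induction fuel with
  | zero =>
      intro i used hle
      by_cases hi : i = (mrows.length : Int)
      · rw [count_combination, if_pos hi]
        simp [leafSets, hi, bitmaskOf, PySem.Set.ofList, PySem.Set.add, PySem.Set.empty,
          PySem.Set.contains]
      · have hgt : (mrows.length : Int) < i := by omega
        rw [count_combination, if_neg hi]
        have hnone : PySem.List.pyGet? mrows i = none := by
          rw [PySem.List.pyGet?_eq_none_iff]
          intro hin
          exact absurd hin.2 (by omega)
        split
        · simp [leafSets, hi, PySem.Set.ofList, PySem.Set.empty]
        · next row heq => rw [hnone] at heq; cases heq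
  | succ f ih =>
      intro i used hle
      by_cases hi : i = (mrows.length : Int)
      · rw [count_combination, if_pos hi]
        simp [leafSets, hi, bitmaskOf, PySem.Set.ofList, PySem.Set.add, PySem.Set.empty,
          PySem.Set.contains]
      · rw [count_combination, if_neg hi]
        split
        · next hg =>
            simp only [leafSets, if_neg hi, rowExpand, hg]
            simp [PySem.Set.ofList, PySem.Set.empty]
        · next row hg =>
            have hin : PySem.Raise.InRange mrows.length i := by
              by_contra hc
              rw [← PySem.List.pyGet?_eq_none_iff] at hc
              simp [hc] at hg
            have hlt : i < (mrows.length : Int) := hin.2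
            have IH : ∀ used' : PySem.Set Int,
                count_combination mrows used' (i + 1)
                  = PySem.Set.ofList ((leafSets f mrows used' (i + 1)).map bitmaskOf) := by
              intro used'
              exact ih (i + 1) used' (by omega)
            rw [lemLoop mrows i hlt f IH row used []]
            simp only [leafSets, if_neg hi, rowExpand, hg, Option.getD_some]
            rw [PySem.Set.ofList_eq_foldl]

-- the frontier fold enumerates the completed id-sets in the same DFS order
theorem lemB (mrows : List (List Int)) :
    ∀ (fuel : Nat) (i : Int) (fr : List (PySem.Set Int)),
    (((mrows.length : Int) - i).toNat ≤ fuel) → i ≤ (mrows.length : Int) →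
    (PySem.List.pyRange i (mrows.length : Int)).foldl
      (fun frontier index => frontier.flatMap (fun s => rowExpand mrows index s)) fr
    = fr.flatMap (fun s => leafSets fuel mrows s i) := by
  intro fuel
  induction fuel with
  | zero =>
      intro i fr hle hile
      have hi : i = (mrows.length : Int) := by omega
      rw [hi, PySem.List.pyRange_one_eq_nil (le_refl _)]
      simp only [List.foldl_nil]
      have : (fun s => leafSets 0 mrows s (mrows.length : Int)) = fun s => [s] := by
        funext s; simp [leafSets]
      rw [this, List.flatMap_singleton']
  | succ f ih =>
      intro i fr hle hile
      by_cases hi : i = (mrows.length : Int)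
      · rw [hi, PySem.List.pyRange_one_eq_nil (le_refl _)]
        simp only [List.foldl_nil]
        have : (fun s => leafSets (f + 1) mrows s (mrows.length : Int)) = fun s => [s] := by
          funext s; simp [leafSets]
        rw [this, List.flatMap_singleton']
      · have hlt : i < (mrows.length : Int) := lt_of_le_of_ne hile hi
        rw [PySem.List.pyRange_one_cons hlt]
        rw [List.foldl_cons]
        rw [ih (i + 1) (fr.flatMap (fun s => rowExpand mrows i s)) (by omega) (by omega)]
        rw [List.flatMap_assoc]
        have hfun : (fun s => leafSets (f + 1) mrows s i)
            = fun s => List.flatMap (fun s' => leafSets f mrows s' (i + 1)) (rowExpand mrows i s) := by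
          funext s
          simp [leafSets, hi]
        rw [hfun]

-- ===== VERDICT (by name: the statement is the Claim_ definition above) =====
theorem count_combination_spec : Claim_equal_count_combination := by
  intro matched_ids used_ids current_index _ hpre
  obtain ⟨_, hile, hnd, _⟩ := hpre
  unfold Spec_count_combination
  unfold count_combination_alt
  rw [ofList_of_nodup used_ids hnd]
  rw [lemB matched_ids (((matched_ids.length : Int) - current_index).toNat)
      current_index [used_ids] (le_refl _) hile]
  rw [lemA matched_ids (((matched_ids.length : Int) - current_index).toNat)
      current_index used_ids (le_refl _)]
  rw [List.flatMap_cons, List.flatMap_nil, List.append_nil]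
  rw [PySem.Set.ofList_eq_foldl, List.foldl_map]
  rfl
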